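-- pv_equiv track=rewrite | github.com/aibaellord/BaelTheLordOfAll-AI | core/singularity/singularity.py | _select_reasoning_engines
-- ===== SOURCE A (Python) =====
-- from typing import Any, Callable, Dict, List, Optional, Set, Tuple, Type
--
-- def _select_reasoning_engines(query: str) -> List[str]:
--     """Auto-select appropriate reasoning engines."""
--     query_lower = query.lower()
--     engines = []
--
--     if any(w in query_lower for w in ["why", "cause", "because"]):
--         engines.append("causal_reasoning")
--     if any(w in query_lower for w in ["what if", "would", "could have"]):
--         engines.append("counterfactual")
--     if any(w in query_lower for w in ["when", "before", "after", "sequence"]):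
--         engines.append("temporal_reasoning")
--     if any(w in query_lower for w in ["should", "must", "ought", "allowed"]):
--         engines.append("deontic")
--     if any(w in query_lower for w in ["probably", "likely", "chance"]):
--         engines.append("probabilistic")
--     if any(w in query_lower for w in ["game", "strategy", "opponent"]):
--         engines.append("game_theory")
--     if any(w in query_lower for w in ["negotiate", "deal", "offer"]):
--         engines.append("negotiation")
--
--     # Default engines
--     if not engines:
--         engines = ["deductive", "inductive", "analogical"]
--
--     return engines
-- ===== SOURCE B (Python) =====
-- from typing import List
--
-- # keyword -> engine label, inverted index
-- KEYWORD_ENGINE = {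
--     "why": "causal_reasoning", "cause": "causal_reasoning", "because": "causal_reasoning",
--     "what if": "counterfactual", "would": "counterfactual", "could have": "counterfactual",
--     "when": "temporal_reasoning", "before": "temporal_reasoning",
--     "after": "temporal_reasoning", "sequence": "temporal_reasoning",
--     "should": "deontic", "must": "deontic", "ought": "deontic", "allowed": "deontic",
--     "probably": "probabilistic", "likely": "probabilistic", "chance": "probabilistic",
--     "game": "game_theory", "strategy": "game_theory", "opponent": "game_theory",
--     "negotiate": "negotiation", "deal": "negotiation", "offer": "negotiation",
-- }
--
-- ENGINE_ORDER = ["causal_reasoning", "counterfactual", "temporal_reasoning",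
--                 "deontic", "probabilistic", "game_theory", "negotiation"]
--
-- def _select_reasoning_engines(query: str) -> List[str]:
--     """Single positional scan of the query: at each index, test which keywords
--     start there; collect the matched engines, then emit them in canonical order."""
--     q = query.lower()
--     matched = set()
--     for i in range(len(q)):
--         for kw, engine in KEYWORD_ENGINE.items():
--             if q.startswith(kw, i):
--                 matched.add(engine)
--     engines = [e for e in ENGINE_ORDER if e in matched]
--     return engines or ["deductive", "inductive", "analogical"]
-- ===== Notes on version B (the rewrite author's own statement) =====
-- stated objective: alternative
-- what changed: Replaces A's per-engine substring tests (seven if/any branches scanning the query once per keyword) with an inverted keyword->engine index and a single positional scan: at each index of the lowered query it tests which keywords start there, collects matched engines in a set, and emits them in canonical engine order with the same empty-default.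
import Mathlib
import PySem

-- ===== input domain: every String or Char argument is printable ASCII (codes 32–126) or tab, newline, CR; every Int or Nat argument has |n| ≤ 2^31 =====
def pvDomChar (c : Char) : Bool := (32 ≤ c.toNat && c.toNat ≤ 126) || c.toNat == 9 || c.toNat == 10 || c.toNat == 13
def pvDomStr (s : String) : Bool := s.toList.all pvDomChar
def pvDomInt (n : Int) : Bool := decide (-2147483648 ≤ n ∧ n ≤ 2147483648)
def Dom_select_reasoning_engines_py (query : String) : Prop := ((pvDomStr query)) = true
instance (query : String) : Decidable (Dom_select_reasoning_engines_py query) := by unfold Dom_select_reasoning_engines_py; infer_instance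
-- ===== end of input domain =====

-- B replaces A's per-engine substring tests by an inverted keyword→engine index and a single
-- positional scan collecting matched engines into a set (objective: alternative); same value.

-- ===== PORT A =====
def select_reasoning_engines_py (query : String) : List String :=
  let query_lower := PySem.Str.lower query
  let engines : List String := []
  let engines := if ["why", "cause", "because"].any (fun w => PySem.Str.isIn w query_lower)
    then engines ++ ["causal_reasoning"] else engines
  let engines := if ["what if", "would", "could have"].any (fun w => PySem.Str.isIn w query_lower)
    then engines ++ ["counterfactual"] else engines
  let engines := if ["when", "before", "after", "sequence"].any (fun w => PySem.Str.isIn w query_lower)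
    then engines ++ ["temporal_reasoning"] else engines
  let engines := if ["should", "must", "ought", "allowed"].any (fun w => PySem.Str.isIn w query_lower)
    then engines ++ ["deontic"] else engines
  let engines := if ["probably", "likely", "chance"].any (fun w => PySem.Str.isIn w query_lower)
    then engines ++ ["probabilistic"] else engines
  let engines := if ["game", "strategy", "opponent"].any (fun w => PySem.Str.isIn w query_lower)
    then engines ++ ["game_theory"] else engines
  let engines := if ["negotiate", "deal", "offer"].any (fun w => PySem.Str.isIn w query_lower)
    then engines ++ ["negotiation"] else engines
  let engines := if engines = [] then ["deductive", "inductive", "analogical"] else engines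
  engines

-- ===== PORT B =====
-- inverted index keyword → engine (insertion order of Source B's KEYWORD_ENGINE dict)
def pvKeywordEngine : List (String × String) :=
  [("why", "causal_reasoning"), ("cause", "causal_reasoning"), ("because", "causal_reasoning"),
   ("what if", "counterfactual"), ("would", "counterfactual"), ("could have", "counterfactual"),
   ("when", "temporal_reasoning"), ("before", "temporal_reasoning"),
   ("after", "temporal_reasoning"), ("sequence", "temporal_reasoning"),
   ("should", "deontic"), ("must", "deontic"), ("ought", "deontic"), ("allowed", "deontic"),
   ("probably", "probabilistic"), ("likely", "probabilistic"), ("chance", "probabilistic"),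
   ("game", "game_theory"), ("strategy", "game_theory"), ("opponent", "game_theory"),
   ("negotiate", "negotiation"), ("deal", "negotiation"), ("offer", "negotiation")]

def pvEngineOrder : List String :=
  ["causal_reasoning", "counterfactual", "temporal_reasoning", "deontic",
   "probabilistic", "game_theory", "negotiation"]

-- Source B's scan loop: for i in range(len(q)): for kw, engine in KEYWORD_ENGINE.items():
--                       if q.startswith(kw, i): matched.add(engine)
def pvMatched (c : List Char) : PySem.Set String :=
  (List.range c.length).foldl
    (fun s i => pvKeywordEngine.foldl
      (fun s p => if PySem.Chars.startswith (c.drop i) p.1.toList then PySem.Set.add s p.2 else s) s)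
    PySem.Set.empty

def select_reasoning_engines_py_alt (query : String) : List String :=
  let c := (PySem.Str.lower query).toList
  let matched := pvMatched c
  let engines := pvEngineOrder.filter (fun e => PySem.Set.contains matched e)
  if engines = [] then ["deductive", "inductive", "analogical"] else engines

-- ===== PRECONDITION & SPEC =====
def Spec_select_reasoning_engines_py (query : String) (out : List String) : Prop := out = select_reasoning_engines_py_alt query
instance (query : String) (out : List String) : Decidable (Spec_select_reasoning_engines_py query out) := by unfold Spec_select_reasoning_engines_py; infer_instance

-- ===== CLAIM (what is proved, stated in full; the proofs are below) =====
def Claim_equal_select_reasoning_engines_py : Prop := ∀ (query : String), Dom_select_reasoning_engines_py query → Spec_select_reasoning_engines_py query (select_reasoning_engines_py query)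

-- ===== LEMMAS AND PROOFS =====

-- A's grouped table, used only to describe A's result (proof helper).
def pvGrouped : List (String × List String) :=
  [("causal_reasoning", ["why", "cause", "because"]),
   ("counterfactual", ["what if", "would", "could have"]),
   ("temporal_reasoning", ["when", "before", "after", "sequence"]),
   ("deontic", ["should", "must", "ought", "allowed"]),
   ("probabilistic", ["probably", "likely", "chance"]),
   ("game_theory", ["game", "strategy", "opponent"]),
   ("negotiation", ["negotiate", "deal", "offer"])]

-- A's unrolled if/append chain is an accumulating pass; it equals filter-then-map.
theorem pv_foldl_filter_map (f : String → Bool) (acc : List String)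
    (t : List (String × List String)) :
    t.foldl (fun acc p => if p.2.any f then acc ++ [p.1] else acc) acc
      = acc ++ (t.filter (fun p => p.2.any f)).map (fun p => p.1) := by
  induction t generalizing acc with
  | nil => simp
  | cons a t ih =>
    simp only [List.foldl_cons, List.filter_cons]
    cases h : a.2.any f
    · simp only [Bool.false_eq_true, if_false, ih]
    · simp only [if_true, ih, List.map_cons, List.append_assoc, List.singleton_append]

-- A's body is definitionally a left fold of the grouped table.
theorem pv_A_eq_foldl (query : String) :
    select_reasoning_engines_py query
      = (let e := pvGrouped.foldl
            (fun acc p => if p.2.any (fun w => PySem.Str.isIn w (PySem.Str.lower query)) then acc ++ [p.1] else acc) [];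
         if e = [] then ["deductive", "inductive", "analogical"] else e) := rfl

-- B's body, with the filtered list named.
theorem pv_B_eq (query : String) :
    select_reasoning_engines_py_alt query
      = (let e := pvEngineOrder.filter
            (fun x => PySem.Set.contains (pvMatched (PySem.Str.lower query).toList) x);
         if e = [] then ["deductive", "inductive", "analogical"] else e) := rfl

-- membership in an if-guarded Set.add fold over the keyword table
theorem pv_mem_inner (g : String × String → Bool) (t : List (String × String))
    (s : PySem.Set String) (x : String) :
    x ∈ t.foldl (fun s p => if g p then PySem.Set.add s p.2 else s) s
      ↔ x ∈ s ∨ ∃ p ∈ t, g p = true ∧ p.2 = x := by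
  induction t generalizing s with
  | nil => simp
  | cons a t ih =>
    simp only [List.foldl_cons, ih]
    cases h : g a
    · simp [h]
    · simp [h, PySem.Set.mem_add]
      tauto
  
-- membership in the nested position × keyword fold
theorem pv_mem_outer (g : Nat → String × String → Bool) (t : List (String × String))
    (is : List Nat) (s : PySem.Set String) (x : String) :
    x ∈ is.foldl (fun s i => t.foldl (fun s p => if g i p then PySem.Set.add s p.2 else s) s) s
      ↔ x ∈ s ∨ ∃ i ∈ is, ∃ p ∈ t, g i p = true ∧ p.2 = x := by
  induction is generalizing s with
  | nil => simp
  | cons i is ih =>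
    simp only [List.foldl_cons, ih, pv_mem_inner, List.mem_cons]
    constructor
    · rintro ((hx | ⟨p, hp, hg, he⟩) | ⟨j, hj, p, hp, hg, he⟩)
      · exact Or.inl hx
      · exact Or.inr ⟨i, Or.inl rfl, p, hp, hg, he⟩
      · exact Or.inr ⟨j, Or.inr hj, p, hp, hg, he⟩
    · rintro (hx | ⟨j, rfl | hj, p, hp, hg, he⟩)
      · exact Or.inl (Or.inl hx)
      · exact Or.inl (Or.inr ⟨p, hp, hg, he⟩)
      · exact Or.inr ⟨j, hj, p, hp, hg, he⟩

-- a bounded positional prefix match is exactly substring containment (nonempty pattern)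
theorem pv_exists_lt_prefix_iff_isIn (kw c : List Char) (h : kw ≠ []) :
    (∃ i < c.length, kw <+: c.drop i) ↔ PySem.Chars.isIn kw c = true := by
  rw [← PySem.Chars.exists_prefix_drop_iff_isIn]
  constructor
  · rintro ⟨i, _, hp⟩; exact ⟨i, hp⟩
  · rintro ⟨j, hp⟩
    by_cases hj : j < c.length
    · exact ⟨j, hj, hp⟩
    · exfalso
      rw [List.drop_eq_nil_of_le (le_of_not_gt hj)] at hp
      exact h (List.prefix_nil.mp hp)

theorem pv_kw_ne : ∀ p ∈ pvKeywordEngine, p.1.toList ≠ [] := by decide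

-- what ends up in Source B's matched set: engines one of whose keywords occurs in the text
theorem pv_mem_matched (c : List Char) (y : String) :
    y ∈ pvMatched c ↔ ∃ p ∈ pvKeywordEngine, PySem.Chars.isIn p.1.toList c = true ∧ p.2 = y := by
  unfold pvMatched
  rw [pv_mem_outer]
  simp only [List.mem_range, PySem.Set.empty, List.not_mem_nil, false_or]
  constructor
  · rintro ⟨i, hi, p, hp, hsw, he⟩
    refine ⟨p, hp, ?_, he⟩
    rw [← pv_exists_lt_prefix_iff_isIn _ _ (pv_kw_ne p hp)]
    exact ⟨i, hi, (PySem.Chars.startswith_iff _ _).mp hsw⟩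
  · rintro ⟨p, hp, hin, he⟩
    obtain ⟨i, hi, hpre⟩ := (pv_exists_lt_prefix_iff_isIn _ _ (pv_kw_ne p hp)).mpr hin
    exact ⟨i, hi, p, hp, (PySem.Chars.startswith_iff _ _).mpr hpre, he⟩

-- map of a filter whose predicate factors through the projection
theorem pv_map_filter (l : List (String × List String)) (p : String × List String → Bool)
    (q : String → Bool) (h : ∀ x ∈ l, p x = q x.1) :
    (l.filter p).map (fun x => x.1) = (l.map (fun x => x.1)).filter q := by
  induction l with
  | nil => rfl
  | cons a l ih =>
    simp only [List.filter_cons, List.map_cons, List.filter_cons]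
    rw [h a (List.mem_cons_self ..)]
    cases hq : q a.1
    · exact ih (fun x hx => h x (List.mem_cons_of_mem _ hx))
    · simp [ih (fun x hx => h x (List.mem_cons_of_mem _ hx))]

-- per-engine agreement of the two predicates
theorem pv_pred_eq (query : String) :
    ∀ x ∈ pvGrouped,
      (x.2.any (fun w => PySem.Str.isIn w (PySem.Str.lower query)))
        = PySem.Set.contains (pvMatched (PySem.Str.lower query).toList) x.1 := by
  intro x hx
  rw [Bool.eq_iff_iff, PySem.Set.contains_iff, pv_mem_matched]
  fin_cases hx <;>
    simp [pvKeywordEngine, List.any_cons, PySem.Str.isIn]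

-- the two filtered lists coincide
theorem pv_lists_eq (query : String) :
    (pvGrouped.filter (fun p => p.2.any (fun w => PySem.Str.isIn w (PySem.Str.lower query)))).map (fun p => p.1)
      = pvEngineOrder.filter
          (fun x => PySem.Set.contains (pvMatched (PySem.Str.lower query).toList) x) := by
  have : pvEngineOrder = pvGrouped.map (fun x => x.1) := rfl
  rw [this, pv_map_filter _ _ _ (pv_pred_eq query)]

-- ===== VERDICT (by name: the statement is the Claim_ definition above) =====
theorem select_reasoning_engines_py_spec : Claim_equal_select_reasoning_engines_py := by
  intro query _
  unfold Spec_select_reasoning_engines_py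
  rw [pv_A_eq_foldl, pv_B_eq]
  simp only [pv_foldl_filter_map, List.nil_append, pv_lists_eq]
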